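-- pv_equiv track=rewrite | github.com/devdanzin/cext-review-toolkit | plugins/cext-review-toolkit/scripts/scan_resource_lifecycle.py | _line_to_offset
-- ===== SOURCE A (Python) =====
-- def _line_to_offset(text: str, line_delta: int) -> int | None:
--     """Convert a line delta to a byte offset in text."""
--     offset = 0
--     for _ in range(line_delta):
--         idx = text.find("\n", offset)
--         if idx == -1:
--             return None
--         offset = idx + 1
--     return offset
-- ===== SOURCE B (Python) =====
-- def _line_to_offset(text: str, line_delta: int) -> int | None:
--     """Convert a line delta to a byte offset in text."""
--     if line_delta <= 0:
--         return 0
--     parts = text.split("\n")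
--     if line_delta > len(parts) - 1:
--         return None
--     return sum(len(p) + 1 for p in parts[:line_delta])
-- ===== Notes on version B (the rewrite author's own statement) =====
-- stated objective: alternative
-- what changed: Replaces the incremental find-loop (repeated text.find('\n', offset)) with a single split('\n') followed by a prefix-sum over the first line_delta segments; None when line_delta exceeds the newline count.
import Mathlib
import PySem

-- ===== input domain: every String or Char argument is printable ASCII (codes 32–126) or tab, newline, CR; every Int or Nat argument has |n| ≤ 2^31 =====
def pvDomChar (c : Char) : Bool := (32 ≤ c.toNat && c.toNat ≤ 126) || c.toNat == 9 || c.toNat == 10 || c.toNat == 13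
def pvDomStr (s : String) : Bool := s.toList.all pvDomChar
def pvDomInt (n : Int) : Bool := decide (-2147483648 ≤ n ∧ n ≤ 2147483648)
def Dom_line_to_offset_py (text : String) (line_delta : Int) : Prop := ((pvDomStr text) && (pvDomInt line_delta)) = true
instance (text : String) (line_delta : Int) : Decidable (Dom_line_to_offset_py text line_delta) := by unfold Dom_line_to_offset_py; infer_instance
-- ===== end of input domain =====

-- B replaces A's incremental find('\n', offset) loop with one split('\n') plus a prefix sum; same cost, different structure.

-- ===== PORT A =====
-- the 'for _ in range(line_delta)' loop, with 'offset' as state; fuel = number of remaining iterations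
def lineToOffsetGoA (text : String) (fuel : Nat) (offset : Int) : Option Int :=
  match fuel with
  | 0 => some offset
  | Nat.succ fuel' =>
    let idx := PySem.Str.findFrom text "\n" offset
    if idx = -1 then none
    else lineToOffsetGoA text fuel' (idx + 1)

def line_to_offset_py (text : String) (line_delta : Int) : Option Int :=
  lineToOffsetGoA text line_delta.toNat 0

-- ===== PORT B =====
def line_to_offset_py_alt (text : String) (line_delta : Int) : Option Int :=
  if line_delta ≤ 0 then some 0
  else
    let parts := (PySem.Str.split? text "\n").getD []  -- sep "\n" ≠ "" so split? is always `some`; the default is never used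
    if line_delta > PySem.List.len parts - 1 then none
    else some (((parts.take line_delta.toNat).map (fun p => PySem.Str.len p + 1)).sum)

-- ===== PRECONDITION & SPEC =====
def Spec_line_to_offset_py (text : String) (line_delta : Int) (out : Option Int) : Prop := out = line_to_offset_py_alt text line_delta
instance (text : String) (line_delta : Int) (out : Option Int) : Decidable (Spec_line_to_offset_py text line_delta out) := by unfold Spec_line_to_offset_py; infer_instance

-- ===== CLAIM (what is proved, stated in full; the proofs are below) =====
def Claim_equal_line_to_offset_py : Prop := ∀ (text : String) (line_delta : Int), Dom_line_to_offset_py text line_delta → Spec_line_to_offset_py text line_delta (line_to_offset_py text line_delta)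

-- ===== LEMMAS AND PROOFS =====

-- structural description of Python's text.split("\n")
def split1 : List Char → List (List Char)
  | [] => [[]]
  | c :: s => if c = '\n' then [] :: split1 s else (split1 s).modifyHead (c :: ·)

theorem split1_ne_nil (s : List Char) : split1 s ≠ [] := by
  induction s with
  | nil => simp [split1]
  | cons c t ih =>
    simp only [split1]
    split_ifs
    · simp
    · cases h : split1 t with
      | nil => exact absurd h ih
      | cons p ps => simp [List.modifyHead]

theorem one_le_split1_len (s : List Char) : 1 ≤ (split1 s).length := by
  cases h : split1 s with
  | nil => exact absurd h (split1_ne_nil s)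
  | cons p ps => simp

theorem go_spec : ∀ (fuel : Nat) (l cur : List Char) (acc : List (List Char)),
    l.length ≤ fuel →
    PySem.Chars.splitOn.go ['\n'] fuel l cur acc
      = acc.reverse ++ (split1 l).modifyHead (cur.reverse ++ ·) := by
  intro fuel
  induction fuel with
  | zero =>
    intro l cur acc h
    have : l = [] := by cases l <;> simp_all
    subst this
    simp [PySem.Chars.splitOn.go, split1]
  | succ n ih =>
    intro l cur acc h
    cases l with
    | nil => simp [PySem.Chars.splitOn.go, split1]
    | cons c rest =>
      simp only [PySem.Chars.splitOn.go]
      by_cases hc : c = '\n'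
      · subst hc
        rw [if_pos (by simp [List.isPrefixOf])]
        rw [show List.drop ['\n'].length ('\n' :: rest) = rest from rfl]
        rw [ih rest [] (cur.reverse :: acc) (by simpa using h)]
        simp only [split1, List.reverse_cons, List.append_assoc, List.reverse_nil,
          List.nil_append, List.singleton_append]
        cases hs : split1 rest <;> simp [List.modifyHead]
      · rw [if_neg (by simp [List.isPrefixOf]; exact fun h' => hc h'.symm)]
        rw [ih rest (c :: cur) acc (by simpa using h)]
        cases hs : split1 rest with
        | nil => exact absurd hs (split1_ne_nil rest)
        | cons p ps => simp [split1, hc, hs, List.modifyHead]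

theorem splitOn_eq_split1 (s : List Char) : PySem.Chars.splitOn s ['\n'] = split1 s := by
  show PySem.Chars.splitOn.go ['\n'] (s.length + 1) s [] [] = split1 s
  rw [go_spec (s.length + 1) s [] [] (by omega)]
  cases hs : split1 s with
  | nil => exact absurd hs (split1_ne_nil s)
  | cons p ps => simp [List.modifyHead]

-- Chars-level mirror of A's loop
def goAC (s : List Char) (fuel : Nat) (offset : Int) : Option Int :=
  match fuel with
  | 0 => some offset
  | Nat.succ fuel' =>
    let idx := PySem.Chars.findFrom s ['\n'] offset
    if idx = -1 then none
    else goAC s fuel' (idx + 1)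

theorem goA_eq_goAC (text : String) (fuel : Nat) (offset : Int) :
    lineToOffsetGoA text fuel offset = goAC text.toList fuel offset := by
  induction fuel generalizing offset with
  | zero => rfl
  | succ n ih =>
    simp only [lineToOffsetGoA, goAC, PySem.Str.findFrom_eq]
    rw [show ("\n" : String).toList = ['\n'] from rfl]
    split_ifs <;> simp [ih]

theorem find_found_lt {s : List Char} (h : PySem.Chars.find s ['\n'] ≠ -1) :
    0 ≤ PySem.Chars.find s ['\n'] ∧ (PySem.Chars.find s ['\n']).toNat < s.length := by
  have h0 : -1 ≤ PySem.Chars.find s ['\n'] := PySem.Chars.neg_one_le_find s _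
  have hpos : 0 ≤ PySem.Chars.find s ['\n'] := by omega
  refine ⟨hpos, ?_⟩
  obtain ⟨hpre, -⟩ := PySem.Chars.find_spec hpos
  have := hpre.length_le
  simp at this
  omega

theorem prefix_nl_getElem? {s : List Char} {i : Nat} (h : ['\n'] <+: s.drop i) :
    s[i]? = some '\n' := by
  rw [← List.head?_drop]
  cases hd : s.drop i with
  | nil => rw [hd] at h; simp at h
  | cons a b =>
    rw [hd] at h
    obtain ⟨t, ht⟩ := h
    simp at ht
    simp
    exact ht.1.symm

theorem getElem?_nl_prefix {s : List Char} {i : Nat} (h : s[i]? = some '\n') :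
    ['\n'] <+: s.drop i := by
  rw [← List.head?_drop] at h
  cases hd : s.drop i with
  | nil => rw [hd] at h; simp at h
  | cons a b =>
    rw [hd] at h
    simp at h
    exact ⟨b, by simp [h]⟩

theorem goAC_shift : ∀ (n : Nat) (s : List Char) (k : Nat), k ≤ s.length →
    goAC s n k = (goAC (s.drop k) n 0).map (fun m => (k : Int) + m) := by
  intro n
  induction n with
  | zero => intro s k hk; simp [goAC]
  | succ n ih =>
    intro s k hk
    simp only [goAC, PySem.Chars.findFrom_zero]
    rw [PySem.Chars.findFrom_natCast s ['\n'] k hk]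
    by_cases hf : PySem.Chars.find (s.drop k) ['\n'] = -1
    · simp [hf]
    · obtain ⟨hpos, hlt⟩ := find_found_lt hf
      set j := (PySem.Chars.find (s.drop k) ['\n']).toNat with hj
      have hfind : PySem.Chars.find (s.drop k) ['\n'] = (j : Int) := by omega
      have hlen : (s.drop k).length = s.length - k := by simp
      rw [if_neg (by omega), if_neg hf]
      have e1 : (k : Int) + PySem.Chars.find (s.drop k) ['\n'] + 1 = ((k + j + 1 : Nat) : Int) := by
        rw [hfind]; push_cast; ring
      have e2 : PySem.Chars.find (s.drop k) ['\n'] + 1 = ((j + 1 : Nat) : Int) := by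
        rw [hfind]; push_cast; ring
      rw [e1, ih s (k + j + 1) (by omega), e2, ih (s.drop k) (j + 1) (by omega)]
      rw [if_neg hf]
      simp only [Option.map_map, List.drop_drop]
      rw [show k + (j + 1) = k + j + 1 from by omega]
      congr 1
      funext m
      simp [Function.comp]
      ring

-- if '\n' first occurs at index j, split1 splits off the first j characters
theorem split1_found : ∀ (j : Nat) (s : List Char), s[j]? = some '\n' →
    (∀ i, i < j → s[i]? ≠ some '\n') →
    split1 s = s.take j :: split1 (s.drop (j + 1)) := by
  intro j
  induction j with
  | zero =>
    intro s hget _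
    cases s with
    | nil => simp at hget
    | cons c t =>
      simp at hget
      simp [split1, hget]
  | succ j ih =>
    intro s hget hbefore
    cases s with
    | nil => simp at hget
    | cons c t =>
      have hc : c ≠ '\n' := by
        have := hbefore 0 (by omega)
        simp at this
        exact this
      have ht : split1 t = t.take j :: split1 (t.drop (j + 1)) := by
        apply ih t (by simpa using hget)
        intro i hi
        have := hbefore (i + 1) (by omega)
        simpa using this
      simp [split1, hc, ht, List.modifyHead]

theorem split1_not_found {s : List Char} (h : PySem.Chars.find s ['\n'] = -1) :
    split1 s = [s] := by
  rw [PySem.Chars.find_eq_neg_one_iff] at h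
  induction s with
  | nil => simp [split1]
  | cons c t ihs =>
    have hc : c ≠ '\n' := by
      intro hc
      exact h (by subst hc; exact ⟨[], t, rfl⟩)
    have ht : split1 t = [t] := ihs (fun hinf => h (hinf.trans (List.infix_cons List.infix_rfl)))
    simp [split1, hc, ht, List.modifyHead]

theorem goAC_spec : ∀ (n : Nat) (s : List Char),
    goAC s n 0 = (if (n : Int) > (split1 s).length - 1 then none
      else some (((split1 s).take n).map (fun p => (p.length : Int) + 1)).sum) := by
  intro n
  induction n with
  | zero =>
    intro s
    have h1 := one_le_split1_len s
    rw [if_neg (by push_cast; omega)]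
    simp [goAC]
  | succ n ih =>
    intro s
    simp only [goAC, PySem.Chars.findFrom_zero]
    by_cases hf : PySem.Chars.find s ['\n'] = -1
    · rw [if_pos hf, split1_not_found hf]
      rw [if_pos (by simp only [List.length_cons, List.length_nil]; push_cast; omega)]
    · obtain ⟨hpos, hlt⟩ := find_found_lt hf
      set j := (PySem.Chars.find s ['\n']).toNat with hj
      have hfind : PySem.Chars.find s ['\n'] = (j : Int) := by omega
      obtain ⟨hpre, hmin⟩ := PySem.Chars.find_spec hpos
      have hgetj : s[j]? = some '\n' := prefix_nl_getElem? hpre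
      have hbefore : ∀ i, i < j → s[i]? ≠ some '\n' := by
        intro i hi hc
        exact hmin i hi (getElem?_nl_prefix hc)
      have hsplit := split1_found j s hgetj hbefore
      rw [if_neg hf]
      have e2 : PySem.Chars.find s ['\n'] + 1 = ((j + 1 : Nat) : Int) := by
        rw [hfind]; push_cast; ring
      rw [e2, goAC_shift n s (j + 1) (by omega), ih (s.drop (j + 1))]
      rw [hsplit]
      have h1 := one_le_split1_len (s.drop (j + 1))
      by_cases hcond : (n : Int) > ((split1 (s.drop (j + 1))).length : Int) - 1
      · rw [if_pos hcond, if_pos (by simp; omega)]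
        simp
      · rw [if_neg hcond, if_neg (by simp; omega)]
        simp only [List.take_succ_cons, List.map_cons, List.sum_cons, Option.map_some,
          Option.some.injEq]
        have htk : ((s.take j).length : Int) = (j : Int) := by simp; omega
        push_cast
        rw [htk]

-- bridge the String-level B to the Chars level
theorem alt_eq (text : String) (line_delta : Int) :
    line_to_offset_py_alt text line_delta
      = (if line_delta ≤ 0 then some 0
         else if line_delta > ((split1 text.toList).length : Int) - 1 then none
         else some (((split1 text.toList).take line_delta.toNat).map (fun p => (p.length : Int) + 1)).sum) := by
  unfold line_to_offset_py_alt
  by_cases h0 : line_delta ≤ 0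
  · simp [h0]
  · rw [if_neg h0, if_neg h0]
    have hb := PySem.Str.split?_map text "\n"
    rw [show ("\n" : String).toList = ['\n'] from rfl] at hb
    rw [PySem.Chars.split?, if_neg (by simp)] at hb
    cases hp : PySem.Str.split? text "\n" with
    | none => rw [hp] at hb; simp at hb
    | some parts =>
      rw [hp] at hb
      simp only [Option.map_some] at hb
      have hparts : parts.map String.toList = split1 text.toList := by
        rw [← splitOn_eq_split1]; exact Option.some.inj hb
      have hlen : parts.length = (split1 text.toList).length := by
        rw [← hparts]; simp
      simp only [Option.getD_some]
      rw [show PySem.List.len parts = (parts.length : Int) from rfl, hlen]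
      by_cases hc : line_delta > ((split1 text.toList).length : Int) - 1
      · simp only [if_pos hc]
      · rw [if_neg hc, if_neg hc]
        rw [← hparts, ← List.map_take, List.map_map]
        simp [Function.comp_def, PySem.Str.len_eq]

-- ===== VERDICT (by name: the statement is the Claim_ definition above) =====
theorem line_to_offset_py_spec : Claim_equal_line_to_offset_py := by
  intro text line_delta _
  unfold Spec_line_to_offset_py
  unfold line_to_offset_py
  rw [goA_eq_goAC, goAC_spec, alt_eq]
  by_cases h0 : line_delta ≤ 0
  · have hz : line_delta.toNat = 0 := by omega
    have h1 := one_le_split1_len text.toList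
    rw [hz, if_pos h0, if_neg (by push_cast; omega)]
    simp
  · have hcast : (line_delta.toNat : Int) = line_delta := by omega
    rw [hcast, if_neg h0]
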